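-- pv_equiv track=rewrite | github.com/amruthsrepo/Practice_programs | OA/zscaler/MAR11/2.py | countSignals
-- ===== SOURCE A (Python) =====
-- def countSignals(frequencies, filtersRanges):
--     maxStart, minEnd = filtersRanges[0]
--
--     for filtersRange in filtersRanges:
--         start, end = filtersRange
--         maxStart = (start, maxStart)[start < maxStart]
--         minEnd = (end, minEnd)[end > minEnd]
--
--     allowCount = 0
--
--     for frequency in frequencies:
--         if maxStart <= frequency <= minEnd:
--             allowCount += 1
--
--     return allowCount
-- ===== SOURCE B (Python) =====
-- def _lowerBound(xs, target):
--     lo, hi = 0, len(xs)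
--     while lo < hi:
--         mid = (lo + hi) // 2
--         if xs[mid] < target:
--             lo = mid + 1
--         else:
--             hi = mid
--     return lo
--
--
-- def countSignals(frequencies, filtersRanges):
--     maxStart = max(s for s, _ in filtersRanges)
--     minEnd = min(e for _, e in filtersRanges)
--     freqs = sorted(frequencies)
--     lo = _lowerBound(freqs, maxStart)
--     hi = _lowerBound(freqs, minEnd + 1)
--     return max(0, hi - lo)
-- ===== Notes on version B (the rewrite author's own statement) =====
-- stated objective: alternative
-- what changed: B replaces A's manual pair-fold and linear membership scan by builtin max/min over the range endpoints plus sorting the frequencies and locating the interval [maxStart, minEnd] with a hand-written lower-bound binary search, returning the clamped index difference.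
import Mathlib
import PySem

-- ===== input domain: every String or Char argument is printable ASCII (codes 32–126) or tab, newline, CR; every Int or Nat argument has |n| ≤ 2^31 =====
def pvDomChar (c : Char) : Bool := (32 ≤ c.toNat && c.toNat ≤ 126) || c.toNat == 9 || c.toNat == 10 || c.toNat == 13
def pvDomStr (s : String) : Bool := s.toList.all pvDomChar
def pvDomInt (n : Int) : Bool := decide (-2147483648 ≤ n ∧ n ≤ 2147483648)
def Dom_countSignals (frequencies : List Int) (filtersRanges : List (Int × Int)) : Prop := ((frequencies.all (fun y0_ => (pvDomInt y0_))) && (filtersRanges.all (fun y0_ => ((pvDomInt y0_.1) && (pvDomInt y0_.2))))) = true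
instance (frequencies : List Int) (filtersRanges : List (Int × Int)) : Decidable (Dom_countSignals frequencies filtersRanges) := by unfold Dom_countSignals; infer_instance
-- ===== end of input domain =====

-- B sorts the frequencies and counts the interval [maxStart, minEnd] with a hand-written
-- lower-bound binary search instead of A's pair-fold plus linear scan (alternative, not faster).

-- ===== PORT A =====
def countSignals (frequencies : List Int) (filtersRanges : List (Int × Int)) : Int :=
  match filtersRanges with
  | [] => 0  -- Python raises IndexError here (filtersRanges[0]); excluded by Pre_
  | p :: _ =>
    let st := filtersRanges.foldl
      (fun (st : Int × Int) fr =>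
        (if fr.1 < st.1 then st.1 else fr.1, if fr.2 > st.2 then st.2 else fr.2))
      (p.1, p.2)
    frequencies.foldl (fun acc f => if st.1 ≤ f ∧ f ≤ st.2 then acc + 1 else acc) 0

-- ===== PORT B =====
-- Source B's while-loop binary search, transcribed as recursion on hi - lo
def lowerBound (xs : List Int) (target : Int) (lo hi : Nat) : Nat :=
  if _h : lo < hi then
    let mid := (lo + hi) / 2
    if xs.getD mid 0 < target then lowerBound xs target (mid + 1) hi
    else lowerBound xs target lo mid
  else lo
termination_by hi - lo
decreasing_by all_goals omega

def countSignals_alt (frequencies : List Int) (filtersRanges : List (Int × Int)) : Int :=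
  match PySem.List.max? (filtersRanges.map Prod.fst) (fun x => x),
        PySem.List.min? (filtersRanges.map Prod.snd) (fun x => x) with
  | some maxStart, some minEnd =>
    let freqs := PySem.List.sorted frequencies (fun x => x) false
    let lo := lowerBound freqs maxStart 0 freqs.length
    let hi := lowerBound freqs (minEnd + 1) 0 freqs.length
    max 0 ((hi : Int) - (lo : Int))
  | _, _ => 0  -- unreachable under Pre_ (max/min of an empty sequence raises)

-- ===== PRECONDITION & SPEC =====
-- A raises IndexError on filtersRanges = [] (and B's max() raises ValueError there): excluded.
def Pre_countSignals (frequencies : List Int) (filtersRanges : List (Int × Int)) : Prop :=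
  filtersRanges ≠ []
instance (frequencies : List Int) (filtersRanges : List (Int × Int)) : Decidable (Pre_countSignals frequencies filtersRanges) := by unfold Pre_countSignals; infer_instance
def pvWitness_countSignals : List Int × (List (Int × Int)) := ([1, 2, 5], [(0, 4), (1, 6)])

def Spec_countSignals (frequencies : List Int) (filtersRanges : List (Int × Int)) (out : Int) : Prop := out = countSignals_alt frequencies filtersRanges
instance (frequencies : List Int) (filtersRanges : List (Int × Int)) (out : Int) : Decidable (Spec_countSignals frequencies filtersRanges out) := by unfold Spec_countSignals; infer_instance

-- ===== CLAIM (what is proved, stated in full; the proofs are below) =====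
def Claim_equal_countSignals : Prop := ∀ (frequencies : List Int) (filtersRanges : List (Int × Int)), Dom_countSignals frequencies filtersRanges → Pre_countSignals frequencies filtersRanges → Spec_countSignals frequencies filtersRanges (countSignals frequencies filtersRanges)

-- ===== LEMMAS AND PROOFS =====

-- A's pair fold is (running max of fsts, running min of snds)
theorem foldl_pair_eq (t : List (Int × Int)) (a b : Int) :
    t.foldl (fun (st : Int × Int) fr =>
        (if fr.1 < st.1 then st.1 else fr.1, if fr.2 > st.2 then st.2 else fr.2)) (a, b)
      = (t.foldl (fun m fr => max m fr.1) a, t.foldl (fun m fr => min m fr.2) b) := by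
  induction t generalizing a b with
  | nil => rfl
  | cons x t ih =>
    simp only [List.foldl_cons]
    rw [ih]
    have h1 : (if x.1 < a then a else x.1) = max a x.1 := by rw [max_def]; split_ifs <;> omega
    have h2 : (if x.2 > b then b else x.2) = min b x.2 := by rw [min_def]; split_ifs <;> omega
    rw [h1, h2]

-- index j is inside the (· < t)-prefix of a sorted list iff its element is < t
theorem mem_prefix_iff (xs : List Int) (t : Int) (hs : List.Pairwise (fun a b => a ≤ b) xs) :
    ∀ j (hj : j < xs.length), (xs[j] < t ↔ j < (xs.takeWhile (fun x => decide (x < t))).length) := by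
  induction xs with
  | nil => intro j hj; simp at hj
  | cons x l ih =>
    rw [List.pairwise_cons] at hs
    intro j hj
    by_cases hx : x < t
    · rw [List.takeWhile_cons_of_pos (by simpa using hx)]
      cases j with
      | zero => exact iff_of_true hx (by simp)
      | succ j =>
        simp only [List.getElem_cons_succ, List.length_cons]
        rw [ih hs.2 j (by simpa using hj)]
        omega
    · rw [List.takeWhile_cons_of_neg (by simpa using hx)]
      simp only [List.length_nil]
      cases j with
      | zero => exact iff_of_false hx (by omega)
      | succ j =>
        simp only [List.getElem_cons_succ]
        constructor
        · intro hlt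
          exact absurd (lt_of_le_of_lt (hs.1 _ (List.getElem_mem _)) hlt) hx
        · omega

-- on a sorted list the (· < t)-prefix length is the (· < t)-count
theorem takeWhile_length_eq_countP (xs : List Int) (t : Int)
    (hs : List.Pairwise (fun a b => a ≤ b) xs) :
    (xs.takeWhile (fun x => decide (x < t))).length = xs.countP (fun x => decide (x < t)) := by
  induction xs with
  | nil => rfl
  | cons x l ih =>
    rw [List.pairwise_cons] at hs
    by_cases hx : x < t
    · rw [List.takeWhile_cons_of_pos (by simpa using hx),
        List.countP_cons_of_pos (by simpa using hx)]
      simp [ih hs.2]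
    · rw [List.takeWhile_cons_of_neg (by simpa using hx),
        List.countP_cons_of_neg (by simpa using hx)]
      simp only [List.length_nil]
      symm
      rw [List.countP_eq_zero]
      intro a ha
      simp only [decide_eq_true_eq]
      exact fun h => hx (lt_of_le_of_lt (hs.1 a ha) h)

-- Source B's binary search returns the prefix length (takeWhile (· < t)).length on a sorted list
theorem lowerBound_eq (xs : List Int) (t : Int)
    (hs : List.Pairwise (fun a b => a ≤ b) xs) (lo hi : Nat)
    (hlo : lo ≤ (xs.takeWhile (fun x => decide (x < t))).length)
    (hhi : (xs.takeWhile (fun x => decide (x < t))).length ≤ hi)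
    (hle : hi ≤ xs.length) :
    lowerBound xs t lo hi = (xs.takeWhile (fun x => decide (x < t))).length := by
  rw [lowerBound]
  dsimp only
  split_ifs with h1 h2
  · have hmid : (lo + hi) / 2 < xs.length := by omega
    rw [List.getD_eq_getElem _ _ hmid] at h2
    have hm := (mem_prefix_iff xs t hs _ hmid).mp h2
    exact lowerBound_eq xs t hs _ hi (by omega) hhi hle
  · have hmid : (lo + hi) / 2 < xs.length := by omega
    have hc : (xs.takeWhile (fun x => decide (x < t))).length ≤ (lo + hi) / 2 := by
      by_contra hcon
      rw [not_le] at hcon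
      rw [List.getD_eq_getElem _ _ hmid] at h2
      exact h2 ((mem_prefix_iff xs t hs _ hmid).mpr hcon)
    exact lowerBound_eq xs t hs lo _ hlo hc (by omega)
  · omega
termination_by hi - lo

-- pointwise additivity of countP
theorem countP_add_countP (p q r : Int → Bool)
    (hpt : ∀ x, (if p x then 1 else 0) + (if q x then 1 else 0) = (if r x then (1 : Nat) else 0)) :
    ∀ l : List Int, l.countP p + l.countP q = l.countP r := by
  intro l
  induction l with
  | nil => rfl
  | cons a l ih =>
    simp only [List.countP_cons]
    have := hpt a
    omega

-- A's counting loop is countP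
theorem foldl_count (M E : Int) (l : List Int) (acc : Int) :
    l.foldl (fun acc f => if M ≤ f ∧ f ≤ E then acc + 1 else acc) acc
      = acc + l.countP (fun f => decide (M ≤ f ∧ f ≤ E)) := by
  induction l generalizing acc with
  | nil => simp
  | cons x l ih =>
    simp only [List.foldl_cons, List.countP_cons]
    rw [ih]
    by_cases h : M ≤ x ∧ x ≤ E <;> simp [h] <;> omega

theorem countSignals_spec : Claim_equal_countSignals := by
  intro freq fl _hd hpre
  unfold Spec_countSignals
  cases fl with
  | nil => exact absurd rfl hpre
  | cons p tl =>
    simp only [countSignals, countSignals_alt, List.map_cons,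
      PySem.List.max?_id_cons, PySem.List.min?_id_cons, List.foldl_cons, List.foldl_map]
    rw [foldl_pair_eq]
    simp only [ite_self]
    set M := tl.foldl (fun m fr => max m fr.1) p.1 with hM
    set E := tl.foldl (fun m fr => min m fr.2) p.2 with hE
    set xs := PySem.List.sorted freq (fun x => x) false with hxs
    have hs : List.Pairwise (fun a b : Int => a ≤ b) xs := by
      simpa using PySem.List.sorted_pairwise freq (fun x => x)
    rw [lowerBound_eq xs M hs 0 xs.length (Nat.zero_le _)
        ((List.takeWhile_prefix _).length_le) (le_refl _),
      lowerBound_eq xs (E + 1) hs 0 xs.length (Nat.zero_le _)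
        ((List.takeWhile_prefix _).length_le) (le_refl _),
      takeWhile_length_eq_countP xs M hs, takeWhile_length_eq_countP xs (E + 1) hs,
      foldl_count M E freq]
    have hperm := (PySem.List.sorted_perm freq (fun x : Int => x) false).countP_eq
      (fun f => decide (M ≤ f ∧ f ≤ E))
    rw [← hxs] at hperm
    rw [← hperm]
    by_cases hME : M ≤ E
    · have key := countP_add_countP (fun f => decide (M ≤ f ∧ f ≤ E))
        (fun f => decide (f < M)) (fun f => decide (f < E + 1))
        (by
          intro x
          by_cases u : M ≤ x ∧ x ≤ E <;> by_cases v : x < M <;> by_cases w : x < E + 1 <;>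
            simp [u, v, w] <;> omega) xs
      omega
    · have hzero : xs.countP (fun f => decide (M ≤ f ∧ f ≤ E)) = 0 :=
        List.countP_eq_zero.mpr (by intro a _; simp only [decide_eq_true_eq]; omega)
      have hmono : xs.countP (fun f => decide (f < E + 1)) ≤ xs.countP (fun f => decide (f < M)) :=
        List.countP_mono_left (by intro a _ h; simp only [decide_eq_true_eq] at h ⊢; omega)
      omega
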